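-- pv_equiv track=rewrite | github.com/ezhk/algo_and_structures_python | Lesson_3/5.py | search_max_negative
-- ===== SOURCE A (Python) =====
-- def search_max_negative(arr):
--     max_negative_value = max_negative_idx = None
--
--     for (idx, el) in enumerate(arr):
--         if el > 0:
--             continue
--
--         if max_negative_value is None or max_negative_value < el:
--             max_negative_value = el
--             max_negative_idx = idx
--
--     return max_negative_value, max_negative_idx
-- ===== SOURCE B (Python) =====
-- def search_max_negative(arr):
--     cands = sorted(
--         ((el, idx) for idx, el in enumerate(arr) if not el > 0),
--         key=lambda p: -p[0],
--     )
--     if not cands: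
--         return None, None
--     return cands[0]
-- ===== Notes on version B (the rewrite author's own statement) =====
-- stated objective: alternative
-- what changed: Replaces A's single-pass running-max scan by collecting the non-positive (value, index) candidates and stably sorting them by descending value, then returning the head (stability makes the head the earliest maximal candidate, matching A's tie-breaking).
import Mathlib
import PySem

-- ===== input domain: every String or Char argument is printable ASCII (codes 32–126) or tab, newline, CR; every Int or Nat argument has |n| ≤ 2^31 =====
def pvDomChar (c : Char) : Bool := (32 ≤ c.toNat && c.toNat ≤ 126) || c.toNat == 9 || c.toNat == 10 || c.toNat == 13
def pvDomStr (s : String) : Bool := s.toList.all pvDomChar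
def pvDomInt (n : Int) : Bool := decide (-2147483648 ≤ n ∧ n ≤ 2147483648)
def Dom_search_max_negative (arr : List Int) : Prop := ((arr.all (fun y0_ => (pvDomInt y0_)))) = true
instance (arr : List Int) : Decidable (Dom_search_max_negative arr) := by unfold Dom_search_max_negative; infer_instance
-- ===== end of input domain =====

-- B replaces A's single-pass running-max scan by filter + stable sort by descending value + head (alternative strategy, same result).

-- ===== PORT A =====
-- the loop over enumerate(arr), skipping positives, updating (value, idx) on strict improvement
def search_max_negative (arr : List Int) : Option Int × Option Int :=
  (PySem.List.enumerate arr 0).foldl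
    (fun (st : Option Int × Option Int) (p : Int × Int) =>
      if p.2 > 0 then st
      else
        match st.1 with
        | none => (some p.2, some p.1)
        | some m => if m < p.2 then (some p.2, some p.1) else st)
    (none, none)

-- ===== PORT B =====
-- candidates (el, idx) with not (el > 0); stable sort by key -el; head (or (None, None))
def search_max_negative_alt (arr : List Int) : Option Int × Option Int :=
  match (PySem.List.sorted
      (((PySem.List.enumerate arr 0).filter (fun p => !(p.2 > 0))).map (fun p => (p.2, p.1)))
      (fun p => -p.1) false).head? with
  | none => (none, none)
  | some (el, idx) => (some el, some idx)

-- ===== PRECONDITION & SPEC =====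
def Spec_search_max_negative (arr : List Int) (out : Option Int × Option Int) : Prop := out = search_max_negative_alt arr
instance (arr : List Int) (out : Option Int × Option Int) : Decidable (Spec_search_max_negative arr out) := by unfold Spec_search_max_negative; infer_instance

-- ===== CLAIM (what is proved, stated in full; the proofs are below) =====
def Claim_equal_search_max_negative : Prop := ∀ (arr : List Int), Dom_search_max_negative arr → Spec_search_max_negative arr (search_max_negative arr)

-- ===== LEMMAS AND PROOFS =====

-- view of an optional best pair as A's pair of options
def pvPack (acc : Option (Int × Int)) : Option Int × Option Int :=
  match acc with
  | none => (none, none)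
  | some (m, i) => (some m, some i)

-- running first-maximum (by value) over the candidate list
def pvStep (a : Option (Int × Int)) (x : Int × Int) : Option (Int × Int) :=
  match a with
  | none => some x
  | some m => if m.1 < x.1 then some x else some m

-- A's fold over the raw enumerated list equals (through pvPack) the running
-- first-maximum fold over the filtered, swapped candidate list.
theorem pv_fold_eq (l : List (Int × Int)) (acc : Option (Int × Int)) :
    l.foldl
      (fun (st : Option Int × Option Int) (p : Int × Int) =>
        if p.2 > 0 then st
        else
          match st.1 with
          | none => (some p.2, some p.1)
          | some m => if m < p.2 then (some p.2, some p.1) else st)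
      (pvPack acc)
    = pvPack
        (((l.filter (fun p => !(p.2 > 0))).map (fun p => (p.2, p.1))).foldl pvStep acc) := by
  induction l generalizing acc with
  | nil => rfl
  | cons p l ih =>
    by_cases hp : p.2 > 0
    · simp [List.foldl_cons, hp, ih acc]
    · cases acc with
      | none =>
        simp only [List.foldl_cons, List.filter_cons, hp]
        simpa [pvPack, pvStep, hp] using ih (some (p.2, p.1))
      | some m =>
        obtain ⟨mv, mi⟩ := m
        simp only [List.foldl_cons, List.filter_cons, hp]
        by_cases hlt : mv < p.2
        · simpa [pvPack, pvStep, hp, hlt] using ih (some (p.2, p.1))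
        · simpa [pvPack, pvStep, hp, hlt] using ih (some (mv, mi))

-- head of inserting x into ys by a "goes-before" test
theorem pv_head_insertBy (bf : Int × Int → Int × Int → Bool) (x : Int × Int)
    (ys : List (Int × Int)) :
    (PySem.List.insertBy bf x ys).head? =
      match ys.head? with
      | none => some x
      | some h => if bf x h then some x else some h := by
  cases ys with
  | nil => rfl
  | cons y ys =>
    simp only [PySem.List.insertBy, List.head?_cons]
    by_cases h : bf x y <;> simp [h]

-- head of the insertion-sort fold evolves exactly as a running first-extremum fold
theorem pv_head_foldl_insertBy (bf : Int × Int → Int × Int → Bool)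
    (l : List (Int × Int)) (acc : List (Int × Int)) :
    ((l.foldl (fun a x => PySem.List.insertBy bf x a) acc)).head? =
      l.foldl
        (fun (o : Option (Int × Int)) x =>
          match o with
          | none => some x
          | some h => if bf x h then some x else some h)
        acc.head? := by
  induction l generalizing acc with
  | nil => rfl
  | cons x l ih =>
    simp only [List.foldl_cons]
    rw [ih, pv_head_insertBy]

-- with key p ↦ -p.1, the insertion test coincides with pvStep
theorem pv_step_eq :
    (fun (o : Option (Int × Int)) (x : Int × Int) =>
      match o with
      | none => some x
      | some h => if (fun (a b : Int × Int) => decide (-a.1 < -b.1)) x h then some x else some h)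
    = pvStep := by
  funext o x
  cases o with
  | none => rfl
  | some h =>
    simp only [pvStep]
    by_cases hc : h.1 < x.1
    · simp [hc, show (-x.1 < -h.1) by omega]
    · simp [hc, show ¬(-x.1 < -h.1) by omega]

-- head of the stable sort by -value = running first-maximum fold
theorem pv_sorted_head (cands : List (Int × Int)) :
    (PySem.List.sorted cands (fun p => -p.1) false).head? = cands.foldl pvStep none := by
  rw [PySem.List.sorted_eq_foldl_insertBy, pv_head_foldl_insertBy]
  rw [show ([] : List (Int × Int)).head? = none from rfl, ← pv_step_eq]

-- ===== VERDICT (by name: the statement is the Claim_ definition above) =====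
theorem search_max_negative_spec : Claim_equal_search_max_negative := by
  intro arr _
  unfold Spec_search_max_negative search_max_negative search_max_negative_alt
  rw [pv_sorted_head]
  rw [show ((none, none) : Option Int × Option Int) = pvPack none from rfl,
      pv_fold_eq (PySem.List.enumerate arr 0) none]
  cases ((((PySem.List.enumerate arr 0).filter (fun p => !(p.2 > 0))).map
      (fun p => (p.2, p.1))).foldl pvStep none) with
  | none => rfl
  | some m => obtain ⟨a, b⟩ := m; rfl
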